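-- pv_equiv track=rewrite | github.com/aamelegy/Problems | acmicpc/level2/phase1/SRM391DivII500.py | iso
-- ===== SOURCE A (Python) =====
-- def iso(w1):
--     mp=dict()
--     w=''
--     for i in range (len(w1)):
--         if w1[i] not in mp:
--             mp[w1[i]]=i
--         w+=str(mp[w1[i]])
--     return w
-- ===== SOURCE B (Python) =====
-- def iso(w1):
--     # character-major scatter: for each distinct character (alphabet order),
--     # stamp its first-occurrence label into every position where it occurs,
--     # then join the slot array.
--     slots = [''] * len(w1)
--     for c in sorted(set(w1)):
--         label = str(w1.index(c))
--         for i, d in enumerate(w1):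
--             if d == c:
--                 slots[i] = label
--     return ''.join(slots)
-- ===== Notes on version B (the rewrite author's own statement) =====
-- stated objective: alternative
-- what changed: Replaces A's position-major single pass with a maintained first-occurrence dict by a character-major scatter: for each distinct character in alphabetical order, stamp its first-occurrence label into every position where it occurs in a slot array, then join the slots.
import Mathlib
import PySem

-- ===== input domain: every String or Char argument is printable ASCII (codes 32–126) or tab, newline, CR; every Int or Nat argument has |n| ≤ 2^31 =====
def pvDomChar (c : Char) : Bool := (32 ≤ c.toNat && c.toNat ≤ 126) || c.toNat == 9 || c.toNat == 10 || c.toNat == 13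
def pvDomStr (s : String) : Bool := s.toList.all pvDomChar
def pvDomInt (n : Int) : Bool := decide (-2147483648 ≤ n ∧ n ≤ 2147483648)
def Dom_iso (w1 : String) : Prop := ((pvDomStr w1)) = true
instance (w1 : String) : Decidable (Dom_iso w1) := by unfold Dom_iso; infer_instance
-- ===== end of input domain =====

-- B replaces A's position-major single pass with its maintained first-occurrence dict
-- by a character-major scatter (for each sorted distinct character, stamp its label
-- into all its positions of a slot array). Objective: alternative.

-- ===== PORT A =====
-- one loop iteration: p = (character w1[i], index i); state = (mp, w)
def isoStep (st : PySem.Dict Char Int × List Char) (p : Char × Nat) :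
    PySem.Dict Char Int × List Char :=
  let mp := if st.1.contains p.1 then st.1 else st.1.insert p.1 (p.2 : Int)
  (mp, st.2 ++ PySem.Int.toChars (mp.getD p.1 0))
  -- mp[w1[i]] always present here (just inserted if it was missing), so getD is exact

def iso (w1 : String) : String :=
  String.mk ((w1.toList.zipIdx.foldl isoStep (PySem.Dict.empty, [])).2)

-- ===== PORT B =====
-- label = str(w1.index(c)); w1.index(c) always succeeds (c drawn from set(w1)), so getD is exact
def isoLabel (cs : List Char) (c : Char) : List Char :=
  PySem.Int.toChars (((PySem.List.index? cs c).getD 0 : Nat) : Int)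

-- inner loop: 'for i, d in enumerate(w1): if d == c: slots[i] = label'
def isoPass (cs : List Char) (c : Char) (slots : List (List Char)) : List (List Char) :=
  cs.zipIdx.foldl (fun s p => if p.1 == c then s.set p.2 (isoLabel cs c) else s) slots

def iso_alt (w1 : String) : String :=
  let cs := w1.toList
  String.mk (((PySem.List.sorted (PySem.Set.ofList cs) (fun x => x) false).foldl
      (fun slots c => isoPass cs c slots) (List.replicate cs.length [])).flatten)

-- ===== PRECONDITION & SPEC =====
def Spec_iso (w1 : String) (out : String) : Prop := out = iso_alt w1
instance (w1 : String) (out : String) : Decidable (Spec_iso w1 out) := by unfold Spec_iso; infer_instance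

-- ===== CLAIM (what is proved, stated in full; the proofs are below) =====
def Claim_equal_iso : Prop := ∀ (w1 : String), Dom_iso w1 → Spec_iso w1 (iso w1)

-- ===== LEMMAS AND PROOFS =====

-- ---- A side: the loop emits, per position, the first-occurrence index of its character ----

-- first-occurrence index in pre ++ c :: suf when c ∉ pre
lemma index?_middle {pre suf : List Char} {c : Char} (h : c ∉ pre) :
    PySem.List.index? (pre ++ c :: suf) c = some pre.length := by
  rw [show pre ++ c :: suf = (pre ++ [c]) ++ suf by simp]
  rw [PySem.List.index?_append_of_mem suf (by simp)]
  exact PySem.List.index?_append_singleton_self pre c h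

-- loop invariant: mp is exactly the first-occurrence table of the processed prefix
lemma iso_loop (cs : List Char) : ∀ (suf pre : List Char) (mp : PySem.Dict Char Int)
    (acc : List Char), cs = pre ++ suf →
    (∀ c, mp.get? c = (PySem.List.index? pre c).map (fun n => ((n : Nat) : Int))) →
    ((suf.zipIdx pre.length).foldl isoStep (mp, acc)).2
      = acc ++ suf.flatMap (fun c => isoLabel cs c) := by
  intro suf
  induction suf with
  | nil => intro pre mp acc _ _; simp
  | cons c rest ih =>
    intro pre mp acc hcat hmp
    have hcontains : mp.contains c = decide (c ∈ pre) := by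
      rw [PySem.Dict.contains_eq_isSome_get?, hmp c]
      by_cases hc : c ∈ pre
      · simp [hc, Option.isSome_map]
      · have : PySem.List.index? pre c = none := by
          rw [PySem.List.index?_eq_none_iff]; exact hc
        simp [hc]
    by_cases hc : c ∈ pre
    · -- seen before: dict unchanged, value = first index in pre = first index in cs
      obtain ⟨k, hk⟩ := (PySem.List.index?_isSome_iff (xs := pre) (v := c)).mpr hc
        |> Option.isSome_iff_exists.mp
      have hidx : PySem.List.index? cs c = some k := by
        rw [hcat, PySem.List.index?_append_of_mem _ hc, hk]
      have hstep : isoStep (mp, acc) (c, pre.length)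
          = (mp, acc ++ PySem.Int.toChars ((k : Nat) : Int)) := by
        simp only [isoStep, hcontains, hc, decide_true, if_true,
          PySem.Dict.getD_eq_get?_getD, hmp c, hk, Option.map_some, Option.getD_some]
      rw [List.zipIdx_cons, List.foldl_cons, hstep,
        show pre.length + 1 = (pre ++ [c]).length by simp]
      rw [ih (pre ++ [c]) mp _ (by simp [hcat]) ?_]
      · simp only [List.flatMap_cons, isoLabel, hidx, Option.getD_some, List.append_assoc]
      · intro c'
        by_cases hc' : c' ∈ pre
        · rw [PySem.List.index?_append_of_mem _ hc', hmp c']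
        · by_cases he : c' = c
          · subst he; exact absurd hc hc'
          · have h1 : PySem.List.index? pre c' = none := by
              rw [PySem.List.index?_eq_none_iff]; exact hc'
            have h2 : PySem.List.index? (pre ++ [c]) c' = none := by
              rw [PySem.List.index?_eq_none_iff]; simp [hc', he]
            rw [h2, hmp c', h1]
    · -- first occurrence: insert index pre.length
      have hidx : PySem.List.index? cs c = some pre.length := by
        rw [hcat]; exact index?_middle hc
      have hstep : isoStep (mp, acc) (c, pre.length)
          = (mp.insert c (pre.length : Int),
             acc ++ PySem.Int.toChars ((pre.length : Nat) : Int)) := by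
        simp [isoStep, hcontains, hc, PySem.Dict.getD_eq_get?_getD,
          PySem.Dict.get?_insert_self]
      rw [List.zipIdx_cons, List.foldl_cons, hstep,
        show pre.length + 1 = (pre ++ [c]).length by simp]
      rw [ih (pre ++ [c]) _ _ (by simp [hcat]) ?_]
      · simp only [List.flatMap_cons, isoLabel, hidx, Option.getD_some, List.append_assoc]
      · intro c'
        by_cases he : c' = c
        · subst he
          rw [PySem.Dict.get?_insert_self, PySem.List.index?_append_singleton_self _ _ hc]
          simp
        · rw [PySem.Dict.get?_insert_of_ne _ _ he, hmp c']
          by_cases hc' : c' ∈ pre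
          · rw [PySem.List.index?_append_of_mem _ hc']
          · have h1 : PySem.List.index? pre c' = none := by
              rw [PySem.List.index?_eq_none_iff]; exact hc'
            have h2 : PySem.List.index? (pre ++ [c]) c' = none := by
              rw [PySem.List.index?_eq_none_iff]; simp [hc', he]
            rw [h1, h2]

lemma iso_eq_flatMap (w1 : String) :
    iso w1 = String.mk (w1.toList.flatMap (fun c => isoLabel w1.toList c)) := by
  unfold iso
  have := iso_loop w1.toList w1.toList [] PySem.Dict.empty [] (by simp)
    (by intro c; simp [PySem.Dict.get?_empty])
  simpa using congrArg String.mk this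

-- ---- B side: the scatter fills slot j with the label of character cs[j] ----

-- the inner scatter preserves the slot array's length
lemma passSeg_length (c : Char) (lbl : List Char) :
    ∀ (l : List Char) (k : Nat) (slots : List (List Char)),
    ((l.zipIdx k).foldl (fun s p => if p.1 == c then s.set p.2 lbl else s) slots).length
      = slots.length := by
  intro l
  induction l with
  | nil => intro k slots; simp
  | cons d t ih =>
    intro k slots
    rw [List.zipIdx_cons, List.foldl_cons, ih]
    by_cases h : d = c <;> simp [h]

-- the inner scatter writes lbl exactly at the positions (offset by k) holding c
lemma passSeg_get? (c : Char) (lbl : List Char) :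
    ∀ (l : List Char) (k : Nat) (slots : List (List Char)),
    k + l.length ≤ slots.length → ∀ j,
    ((l.zipIdx k).foldl (fun s p => if p.1 == c then s.set p.2 lbl else s) slots)[j]?
      = if k ≤ j ∧ l[j - k]? = some c then some lbl else slots[j]? := by
  intro l
  induction l with
  | nil =>
    intro k slots _ j
    simp
  | cons d t ih =>
    intro k slots hlen j
    rw [List.zipIdx_cons, List.foldl_cons]
    have hk : k < slots.length := by simp at hlen; omega
    set slots' : List (List Char) := if (d == c) = true then slots.set k lbl else slots with hs'
    have hlen' : slots'.length = slots.length := by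
      rw [hs']; by_cases h : d = c <;> simp [h]
    rw [ih (k+1) slots' (by simp at hlen ⊢; omega) j]
    have hsj : slots'[j]? = if j = k ∧ d = c then some lbl else slots[j]? := by
      rw [hs']
      by_cases hd : d = c
      · by_cases hj : j = k
        · subst hj; simp [hd, List.getElem?_set_self hk]
        · simp [hd, hj, show k ≠ j from fun h => hj h.symm]
      · simp [hd]
    by_cases hjk : j = k
    · subst hjk
      have : ¬ (j + 1 ≤ j) := by omega
      simp only [this, false_and, if_false, hsj, Nat.sub_self]
      by_cases hd : d = c <;> simp [hd]
    · by_cases hlt : j < k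
      · have h1 : ¬ (k + 1 ≤ j) := by omega
        have h2 : ¬ (k ≤ j) := by omega
        simp only [h1, h2, false_and, if_false, hsj, hjk, false_and, if_false]
      · -- j > k
        have h2 : k ≤ j := by omega
        have h1 : (k + 1 ≤ j) = True := by simp; omega
        have hsub : j - k = (j - (k + 1)) + 1 := by omega
        simp only [h1, true_and, h2, hsub, List.getElem?_cons_succ, hsj, hjk, false_and,
          if_false]

lemma isoPass_length (cs : List Char) (c : Char) (slots : List (List Char)) :
    (isoPass cs c slots).length = slots.length :=
  passSeg_length c (isoLabel cs c) cs 0 slots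

lemma isoPass_get? (cs : List Char) (c : Char) (slots : List (List Char))
    (hlen : cs.length ≤ slots.length) (j : Nat) :
    (isoPass cs c slots)[j]? = if cs[j]? = some c then some (isoLabel cs c) else slots[j]? := by
  have := passSeg_get? c (isoLabel cs c) cs 0 slots (by omega) j
  simpa [isoPass] using this

-- the outer fold: after processing the characters of L, every position whose
-- character is in L holds its label, the rest are untouched
lemma outer_get? (cs : List Char) : ∀ (L : List Char) (slots : List (List Char)),
    slots.length = cs.length →
    (L.foldl (fun s c => isoPass cs c s) slots).length = cs.length ∧
    ∀ j (hj : j < cs.length),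
      (L.foldl (fun s c => isoPass cs c s) slots)[j]?
        = if cs[j] ∈ L then some (isoLabel cs (cs[j])) else slots[j]? := by
  intro L
  induction L with
  | nil => intro slots h; exact ⟨h, by simp⟩
  | cons c L' ih =>
    intro slots h
    rw [List.foldl_cons]
    obtain ⟨hl, hv⟩ := ih (isoPass cs c slots) (by rw [isoPass_length]; exact h)
    refine ⟨hl, ?_⟩
    intro j hj
    rw [hv j hj, isoPass_get? cs c slots (by omega) j]
    have hjget : cs[j]? = some cs[j] := List.getElem?_eq_getElem hj
    by_cases hmem : cs[j] ∈ L'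
    · simp [hmem]
    · by_cases hc : cs[j] = c
      · simp [hc, hjget]
      · have : ¬ (cs[j]? = some c) := by rw [hjget]; simp [hc]
        simp [hmem, hc, this]

lemma iso_alt_eq_flatMap (w1 : String) :
    iso_alt w1 = String.mk (w1.toList.flatMap (fun c => isoLabel w1.toList c)) := by
  simp only [iso_alt]
  set cs := w1.toList with hcs
  obtain ⟨hl, hv⟩ := outer_get? cs (PySem.List.sorted (PySem.Set.ofList cs) (fun x => x) false)
    (List.replicate cs.length []) (by simp)
  have hfin : (PySem.List.sorted (PySem.Set.ofList cs) (fun x => x) false).foldl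
      (fun s c => isoPass cs c s) (List.replicate cs.length [])
      = cs.map (fun c => isoLabel cs c) := by
    apply List.ext_getElem?
    intro j
    by_cases hj : j < cs.length
    · rw [hv j hj]
      have hmem : cs[j] ∈ PySem.List.sorted (PySem.Set.ofList cs) (fun x => x) false := by
        rw [PySem.List.mem_sorted]
        simp [List.getElem_mem hj]
      simp [hmem, List.getElem?_map, List.getElem?_eq_getElem hj]
    · rw [List.getElem?_eq_none (by rw [hl]; omega),
        List.getElem?_eq_none (by simpa using (by omega : cs.length ≤ j))]
  rw [hfin]
  simp [List.flatMap_def]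

-- ===== VERDICT (by name: the statement is the Claim_ definition above) =====
theorem iso_spec : Claim_equal_iso := by
  intro w1 _
  unfold Spec_iso
  rw [iso_eq_flatMap, iso_alt_eq_flatMap]
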